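-- pv_equiv track=rewrite | github.com/Techinoco/task_mapping_fully_SE | moga_taskmapping_bbdlp.py | switchable
-- ===== SOURCE A (Python) =====
-- def switchable(j,constants_in_row,value):
--     flag = True
--     for valA in constants_in_row[j]:
--         if constants_in_row[j][valA] == 'A':
--             i = 0
--             while flag and i < len(constants_in_row):
--                 if valA in constants_in_row[i] and constants_in_row[i][valA] == 'P_' + str(j):
--                     flag = False
--                 i += 1
--
--     return flag
-- ===== SOURCE B (Python) =====
-- def switchable(j, constants_in_row, value):
--     # One pass over all rows builds the set of keys mapped to 'P_'+str(j);
--     # then a single membership test over row j's 'A'-keys.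
--     pj = 'P_' + str(j)
--     pj_keys = set()
--     for row in constants_in_row:
--         for k, v in row.items():
--             if v == pj:
--                 pj_keys.add(k)
--     return all(k not in pj_keys for k, v in constants_in_row[j].items() if v == 'A')
-- ===== Notes on version B (the rewrite author's own statement) =====
-- stated objective: faster
-- what changed: replaces A's per-'A'-key full rescan of all rows with one pass that builds a set of keys mapped to 'P_j', then a single membership test over row j's 'A'-keys
import Mathlib
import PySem

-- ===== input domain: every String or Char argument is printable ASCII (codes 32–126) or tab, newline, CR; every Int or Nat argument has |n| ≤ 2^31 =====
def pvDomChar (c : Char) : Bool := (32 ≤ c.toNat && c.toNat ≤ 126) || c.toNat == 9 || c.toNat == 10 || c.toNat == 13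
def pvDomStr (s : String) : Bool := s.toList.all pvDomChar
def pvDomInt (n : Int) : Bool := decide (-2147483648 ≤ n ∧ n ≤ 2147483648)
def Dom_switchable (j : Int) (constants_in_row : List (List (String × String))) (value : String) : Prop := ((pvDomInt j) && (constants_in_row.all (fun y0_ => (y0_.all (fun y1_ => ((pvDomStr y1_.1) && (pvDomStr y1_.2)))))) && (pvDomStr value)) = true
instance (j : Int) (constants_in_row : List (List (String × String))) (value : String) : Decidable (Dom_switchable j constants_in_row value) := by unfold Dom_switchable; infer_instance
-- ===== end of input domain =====

-- B replaces A's per-'A'-key rescan of all rows with a one-pass 'P_j'-key set build followed by a membership test over row j's 'A'-keys.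


-- ===== PORT A =====
def switchable (j : Int) (constants_in_row : List (List (String × String))) (value : String) : Bool :=
  let row := PySem.List.pyGetD constants_in_row j []   -- constants_in_row[j]; Pre_ excludes IndexError
  let rowD := PySem.Dict.mk row
  row.foldl (fun flag kv =>
    if PySem.Dict.get? rowD kv.1 == some "A" then
      -- while flag and i < len(constants_in_row): scanning rows in order; once flag is False nothing changes
      constants_in_row.foldl (fun f ri =>
        let d := PySem.Dict.mk ri
        if f && (PySem.Dict.contains d kv.1 && (PySem.Dict.getD d kv.1 "" == "P_" ++ PySem.Int.toStr j))
        then false else f) flag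
    else flag) true

-- ===== PORT B =====
def switchable_alt (j : Int) (constants_in_row : List (List (String × String))) (value : String) : Bool :=
  let pj := "P_" ++ PySem.Int.toStr j
  let pjKeys : PySem.Set String :=
    constants_in_row.foldl (fun s row =>
      row.foldl (fun s kv => if kv.2 == pj then PySem.Set.add s kv.1 else s) s) PySem.Set.empty
  (PySem.List.pyGetD constants_in_row j []).all (fun kv =>
    if kv.2 == "A" then !(PySem.Set.contains pjKeys kv.1) else true)

-- ===== PRECONDITION & SPEC =====
-- Pre_ excludes j out of range, where A raises IndexError, and association lists with duplicate
-- keys inside a row, which do not represent any Python dict (A's input rows are dicts).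
def Pre_switchable (j : Int) (constants_in_row : List (List (String × String))) (value : String) : Prop :=
  PySem.Raise.InRange constants_in_row.length j ∧ ∀ row ∈ constants_in_row, (row.map Prod.fst).Nodup
instance (j : Int) (constants_in_row : List (List (String × String))) (value : String) : Decidable (Pre_switchable j constants_in_row value) := by unfold Pre_switchable; infer_instance

def pvWitness_switchable : Int × (List (List (String × String))) × String :=
  (0, [[("a", "A")], [("a", "P_1")]], "")

def Spec_switchable (j : Int) (constants_in_row : List (List (String × String))) (value : String) (out : Bool) : Prop := out = switchable_alt j constants_in_row value
instance (j : Int) (constants_in_row : List (List (String × String))) (value : String) (out : Bool) : Decidable (Spec_switchable j constants_in_row value out) := by unfold Spec_switchable; infer_instance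

-- ===== CLAIM (what is proved, stated in full; the proofs are below) =====
def Claim_equal_switchable : Prop := ∀ (j : Int) (constants_in_row : List (List (String × String))) (value : String), Dom_switchable j constants_in_row value → Pre_switchable j constants_in_row value → Spec_switchable j constants_in_row value (switchable j constants_in_row value)

-- ===== LEMMAS AND PROOFS =====

-- A's inner while-loop as a fold equals 'flag && no row hits'.
lemma inner_fold_eq (l : List (List (String × String))) (c : List (String × String) → Bool) :
    ∀ flag : Bool, l.foldl (fun f ri => if f && c ri then false else f) flag = (flag && !(l.any c)) := by
  induction l with
  | nil => intro flag; simp [List.foldl]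
  | cons ri t ih =>
    intro flag
    cases flag <;> cases hc : c ri <;>
      simp only [List.foldl_cons, hc, Bool.false_and, Bool.true_and, Bool.and_false, Bool.and_true,
        if_true] <;> rw [ih] <;> simp [hc]

-- A's outer fold with a pure '&&' body is List.all.
lemma outer_fold_eq (l : List (String × String)) (g : String × String → Bool) :
    ∀ flag : Bool, l.foldl (fun f kv => f && g kv) flag = (flag && l.all g) := by
  induction l with
  | nil => intro flag; simp [List.foldl]
  | cons kv t ih => intro flag; simp [List.foldl, ih, Bool.and_assoc]

-- membership in B's set-building inner loop over one row
lemma mem_row_fold (pj : String) (row : List (String × String)) :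
    ∀ (s : PySem.Set String) (x : String), s.Nodup →
      ((x ∈ row.foldl (fun s kv => if kv.2 == pj then PySem.Set.add s kv.1 else s) s) ↔
        (x ∈ s ∨ ∃ kv ∈ row, kv.2 = pj ∧ kv.1 = x)) ∧
      (row.foldl (fun s kv => if kv.2 == pj then PySem.Set.add s kv.1 else s) s).Nodup := by
  induction row with
  | nil => intro s x hs; simp [List.foldl, hs]
  | cons kv t ih =>
    intro s x hs
    by_cases h : kv.2 = pj
    · have hadd : (PySem.Set.add s kv.1).Nodup := PySem.Set.nodup_add s kv.1 hs
      have := ih (PySem.Set.add s kv.1) x hadd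
      refine ⟨?_, by simpa [List.foldl, h] using this.2⟩
      rw [List.foldl, if_pos (by simp [h]), this.1]
      simp [PySem.Set.mem_add, h]
      tauto
    · have := ih s x hs
      refine ⟨?_, by simpa [List.foldl, h] using this.2⟩
      rw [List.foldl, if_neg (by simp [h]), this.1]
      constructor
      · rintro (hx | ⟨p, hp, h2, h1⟩)
        · exact Or.inl hx
        · exact Or.inr ⟨p, List.mem_cons_of_mem _ hp, h2, h1⟩
      · rintro (hx | ⟨p, hp, h2, h1⟩)
        · exact Or.inl hx
        · rcases List.mem_cons.1 hp with rfl | hp'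
          · exact absurd h2 h
          · exact Or.inr ⟨p, hp', h2, h1⟩

-- membership in B's full set build
lemma mem_pjKeys (pj : String) (cir : List (List (String × String))) :
    ∀ (s : PySem.Set String) (x : String), s.Nodup →
      ((x ∈ cir.foldl (fun s row => row.foldl (fun s kv => if kv.2 == pj then PySem.Set.add s kv.1 else s) s) s) ↔
        (x ∈ s ∨ ∃ row ∈ cir, ∃ kv ∈ row, kv.2 = pj ∧ kv.1 = x)) ∧
      (cir.foldl (fun s row => row.foldl (fun s kv => if kv.2 == pj then PySem.Set.add s kv.1 else s) s) s).Nodup := by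
  induction cir with
  | nil => intro s x hs; simp [List.foldl, hs]
  | cons r t ih =>
    intro s x hs
    have hr := mem_row_fold pj r s x hs
    have := ih (r.foldl (fun s kv => if kv.2 == pj then PySem.Set.add s kv.1 else s) s) x hr.2
    refine ⟨?_, by simpa [List.foldl] using this.2⟩
    rw [List.foldl, this.1, hr.1]
    constructor
    · rintro ((hx | ⟨kv, hkv, h2, h1⟩) | ⟨row, hrow, hrest⟩)
      · exact Or.inl hx
      · exact Or.inr ⟨r, List.mem_cons_self, kv, hkv, h2, h1⟩
      · exact Or.inr ⟨row, List.mem_cons_of_mem _ hrow, hrest⟩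
    · rintro (hx | ⟨row, hrow, hrest⟩)
      · exact Or.inl (Or.inl hx)
      · rcases List.mem_cons.1 hrow with rfl | hrow'
        · exact Or.inl (Or.inr hrest)
        · exact Or.inr ⟨row, hrow', hrest⟩

-- A's row-hit test equals a get? test
lemma hit_eq_get? (ri : List (String × String)) (k pj : String) :
    (PySem.Dict.contains (PySem.Dict.mk ri) k && (PySem.Dict.getD (PySem.Dict.mk ri) k "" == pj))
      = (PySem.Dict.get? (PySem.Dict.mk ri) k == some pj) := by
  rw [PySem.Dict.contains_eq_isSome_get?, PySem.Dict.getD_eq_get?_getD]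
  cases h : PySem.Dict.get? (PySem.Dict.mk ri) k <;> simp [h]

-- ===== VERDICT (by name: the statement is the Claim_ definition above) =====
theorem switchable_spec : Claim_equal_switchable := by
  intro j cir value _hdom hpre
  obtain ⟨hrange, hnodup⟩ := hpre
  unfold Spec_switchable switchable switchable_alt
  simp only []
  set pj := "P_" ++ PySem.Int.toStr j with hpj
  set row := PySem.List.pyGetD cir j ([] : List (String × String)) with hrow
  have hrowmem : row ∈ cir := PySem.List.pyGetD_mem _ _ hrange
  have hrownd : (row.map Prod.fst).Nodup := hnodup row hrowmem
  -- rewrite A's fold into an 'all'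
  have hA : (row.foldl (fun flag kv =>
      if PySem.Dict.get? (PySem.Dict.mk row) kv.1 == some "A" then
        cir.foldl (fun f ri =>
          if f && (PySem.Dict.contains (PySem.Dict.mk ri) kv.1 && (PySem.Dict.getD (PySem.Dict.mk ri) kv.1 "" == pj))
          then false else f) flag
      else flag) true)
      = row.all (fun kv =>
          if PySem.Dict.get? (PySem.Dict.mk row) kv.1 == some "A" then
            !(cir.any (fun ri => PySem.Dict.get? (PySem.Dict.mk ri) kv.1 == some pj)) else true) := by
    have hstep : (fun (flag : Bool) (kv : String × String) =>
        if PySem.Dict.get? (PySem.Dict.mk row) kv.1 == some "A" then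
          cir.foldl (fun f ri =>
            if f && (PySem.Dict.contains (PySem.Dict.mk ri) kv.1 && (PySem.Dict.getD (PySem.Dict.mk ri) kv.1 "" == pj))
            then false else f) flag
        else flag)
        = (fun (flag : Bool) (kv : String × String) =>
            flag && (if PySem.Dict.get? (PySem.Dict.mk row) kv.1 == some "A" then
              !(cir.any (fun ri => PySem.Dict.get? (PySem.Dict.mk ri) kv.1 == some pj)) else true)) := by
      funext flag kv
      by_cases h : PySem.Dict.get? (PySem.Dict.mk row) kv.1 == some "A"
      · simp only [h, if_true]
        rw [inner_fold_eq]
        congr 2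
        apply PySem.List.any_congr_mem
        intro ri _
        exact hit_eq_get? ri kv.1 pj
      · simp [h]
    rw [hstep, outer_fold_eq]
    simp
  rw [hA]
  -- now compare the two 'all's pointwise on row members
  rw [List.all_eq_not_any_not, List.all_eq_not_any_not]
  congr 1
  apply PySem.List.any_congr_mem
  intro kv hkv
  -- per-element values of kv.2 vs get? on row
  have hget : PySem.Dict.get? (PySem.Dict.mk row) kv.1 = some kv.2 :=
    PySem.Dict.get?_of_mem_items (d := PySem.Dict.mk row) hkv hrownd
  have hset : PySem.Set.contains (cir.foldl (fun s row =>
      row.foldl (fun s kv => if kv.2 == pj then PySem.Set.add s kv.1 else s) s) PySem.Set.empty) kv.1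
      = cir.any (fun ri => PySem.Dict.get? (PySem.Dict.mk ri) kv.1 == some pj) := by
    have hmem := (mem_pjKeys pj cir PySem.Set.empty kv.1 (by simp [PySem.Set.empty])).1
    by_cases hx : kv.1 ∈ cir.foldl (fun s row =>
        row.foldl (fun s kv => if kv.2 == pj then PySem.Set.add s kv.1 else s) s) PySem.Set.empty
    · have : ∃ row ∈ cir, ∃ p ∈ row, p.2 = pj ∧ p.1 = kv.1 := by
        rcases (hmem.1 hx) with h | h
        · simp [PySem.Set.empty] at h
        · exact h
      obtain ⟨ri, hri, p, hp, h2, h1⟩ := this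
      have : PySem.Dict.get? (PySem.Dict.mk ri) kv.1 = some pj := by
        have hg := PySem.Dict.get?_of_mem_items (d := PySem.Dict.mk ri)
          (show (p.1, p.2) ∈ (PySem.Dict.mk ri).items by simpa using hp) (hnodup ri hri)
        rw [← h1, ← h2]; exact hg
      rw [List.any_eq_true.2 ⟨ri, hri, by simp [this]⟩]
      simpa [PySem.Set.contains_iff] using hx
    · have hno : cir.any (fun ri => PySem.Dict.get? (PySem.Dict.mk ri) kv.1 == some pj) = false := by
        rw [List.any_eq_false]
        intro ri hri hcontra
        have : (kv.1, pj) ∈ ri := by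
          have := PySem.Dict.mem_items_of_get?_eq_some (d := PySem.Dict.mk ri) (by simpa using hcontra)
          simpa using this
        exact hx (hmem.2 (Or.inr ⟨ri, hri, (kv.1, pj), this, rfl, rfl⟩))
      rw [hno]
      simp only [Bool.eq_false_iff, ne_eq]
      intro hc
      exact hx (by simpa [PySem.Set.contains_iff] using hc)
  by_cases hA2 : kv.2 = "A"
  · simp only [hget, hA2, beq_self_eq_true, if_true, Bool.not_not]
    exact hset.symm
  · have h1 : (some kv.2 == some "A") = false := by simpa using hA2
    have h2 : (kv.2 == "A") = false := by simpa using hA2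
    simp only [hget, h1, h2, Bool.false_eq_true, if_false]
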